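-- pv_equiv track=rewrite | github.com/wisent-ai/wisentbot | singularity/skills/api_gateway.py | _scope_matches
-- ===== SOURCE A (Python) =====
-- from typing import Any, Dict, List, Optional
--
-- def _scope_matches(required: str, available: List[str]) -> bool:
--     """Check if any available scope covers the required scope.
--
--     Supports hierarchical scopes: 'skills:*' matches 'skills:read'.
--     """
--     req_parts = required.split(":")
--     for scope in available:
--         scope_parts = scope.split(":")
--         if len(scope_parts) >= 1 and scope_parts[-1] == "*":
--             # Wildcard: check prefix match
--             if req_parts[: len(scope_parts) - 1] == scope_parts[:-1]:
--                 return True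
--     return False
-- ===== SOURCE B (Python) =====
-- def _scope_matches(required, available):
--     """Check if any available scope covers the required scope (hierarchical wildcards)."""
--     prefixes = set()
--     for scope in available:
--         parts = scope.split(":")
--         if parts[-1] == "*":
--             prefixes.add(tuple(parts[:-1]))
--     req_parts = required.split(":")
--     return any(tuple(req_parts[:k]) in prefixes for k in range(len(req_parts) + 1))
-- ===== Notes on version B (the rewrite author's own statement) =====
-- stated objective: alternative
-- what changed: B inverts the traversal: it first indexes the wildcard scopes' prefixes in a set, then probes each prefix of the required scope against that index, instead of scanning the available list and prefix-comparing each scope.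
import Mathlib
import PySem

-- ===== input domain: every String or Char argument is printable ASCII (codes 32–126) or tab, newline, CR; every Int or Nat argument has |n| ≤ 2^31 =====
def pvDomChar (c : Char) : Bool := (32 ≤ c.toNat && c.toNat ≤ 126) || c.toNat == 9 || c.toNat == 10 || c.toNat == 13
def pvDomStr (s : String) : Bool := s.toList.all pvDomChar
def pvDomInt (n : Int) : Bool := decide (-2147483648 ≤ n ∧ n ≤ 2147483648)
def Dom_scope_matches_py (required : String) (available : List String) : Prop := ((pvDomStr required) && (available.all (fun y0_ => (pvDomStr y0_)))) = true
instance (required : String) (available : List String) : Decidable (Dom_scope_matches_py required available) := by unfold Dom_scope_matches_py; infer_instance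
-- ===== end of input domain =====

-- B builds a set index of the wildcard scopes' prefixes and probes the required scope's own prefixes against it (alternative decomposition, not claimed faster).

-- shared helper: s.split(":") — ":" is non-empty, so split? always returns a value
def pySplitColon (s : String) : List String := (PySem.Str.split? s ":").getD []

-- ===== PORT A =====
-- the 'for scope in available' loop with early return
def scopeLoopA (req_parts : List String) : List String → Bool
  | [] => false
  | scope :: rest =>
      let scope_parts := pySplitColon scope
      if (decide (1 ≤ scope_parts.length) && (PySem.List.pyGet? scope_parts (-1) == some "*")) then
        if PySem.List.slice req_parts none (some ((scope_parts.length : Int) - 1))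
             == PySem.List.slice scope_parts none (some (-1)) then
          true
        else scopeLoopA req_parts rest
      else scopeLoopA req_parts rest

def scope_matches_py (required : String) (available : List String) : Bool :=
  scopeLoopA (pySplitColon required) available

-- ===== PORT B =====
def scope_matches_py_alt (required : String) (available : List String) : Bool :=
  let prefixes : PySem.Set (List String) :=
    available.foldl (fun s scope =>
      let parts := pySplitColon scope
      if PySem.List.pyGet? parts (-1) == some "*" then
        PySem.Set.add s (PySem.List.slice parts none (some (-1)))
      else s) PySem.Set.empty
  let req_parts := pySplitColon required
  (PySem.List.pyRange 0 ((req_parts.length : Int) + 1) 1).any (fun k =>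
    PySem.Set.contains prefixes (PySem.List.slice req_parts none (some k)))

-- ===== PRECONDITION & SPEC =====
def Spec_scope_matches_py (required : String) (available : List String) (out : Bool) : Prop := out = scope_matches_py_alt required available
instance (required : String) (available : List String) (out : Bool) : Decidable (Spec_scope_matches_py required available out) := by unfold Spec_scope_matches_py; infer_instance

-- ===== CLAIM (what is proved, stated in full; the proofs are below) =====
def Claim_equal_scope_matches_py : Prop := ∀ (required : String) (available : List String), Dom_scope_matches_py required available → Spec_scope_matches_py required available (scope_matches_py required available)

-- ===== LEMMAS AND PROOFS =====

-- the wildcard test and the prefix each scope contributes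
def isWild (scope : String) : Bool := PySem.List.pyGet? (pySplitColon scope) (-1) == some "*"
def wildPrefix (scope : String) : List String := (pySplitColon scope).dropLast

theorem pyGet_neg_one_some_iff (l : List String) :
    (PySem.List.pyGet? l (-1) == some "*") = true ↔ l.getLast? = some "*" := by
  rw [PySem.List.pyGet?_neg_one]; simp

-- A's loop is an existential over the available scopes
theorem loopA_eq_true_iff (rp : List String) (av : List String) :
    scopeLoopA rp av = true ↔ ∃ scope ∈ av, isWild scope = true ∧
      PySem.List.slice rp none (some (((pySplitColon scope).length : Int) - 1)) = wildPrefix scope := by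
  induction av with
  | nil => simp [scopeLoopA]
  | cons scope rest ih =>
    simp only [scopeLoopA]
    split_ifs with h1 h2
    · simp only [beq_iff_eq] at h2
      constructor
      · intro _
        refine ⟨scope, by simp, ?_, ?_⟩
        · simp only [Bool.and_eq_true, beq_iff_eq] at h1
          simp [isWild, h1.2]
        · rw [h2, wildPrefix, PySem.List.slice_to_neg_one]
      · intro _; rfl
    · rw [ih]
      constructor
      · rintro ⟨s, hs, hw, hp⟩; exact ⟨s, by simp [hs], hw, hp⟩
      · rintro ⟨s, hs, hw, hp⟩
        rcases List.mem_cons.1 hs with rfl | hs'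
        · exfalso
          rw [wildPrefix, ← PySem.List.slice_to_neg_one (xs := pySplitColon s)] at hp
          exact h2 (by simpa using hp)
        · exact ⟨s, hs', hw, hp⟩
    · rw [ih]
      constructor
      · rintro ⟨s, hs, hw, hp⟩; exact ⟨s, by simp [hs], hw, hp⟩
      · rintro ⟨s, hs, hw, hp⟩
        rcases List.mem_cons.1 hs with rfl | hs'
        · exfalso
          apply h1
          simp only [Bool.and_eq_true]
          refine ⟨?_, hw⟩
          rw [isWild, pyGet_neg_one_some_iff] at hw
          have : pySplitColon s ≠ [] := fun h => by simp [h] at hw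
          simpa using List.length_pos_iff.2 this
        · exact ⟨s, hs', hw, hp⟩

-- B's index is the set of wildcard prefixes
theorem fold_add_eq (av : List String) :
    ∀ e : PySem.Set (List String),
      av.foldl (fun s scope =>
        let parts := pySplitColon scope
        if PySem.List.pyGet? parts (-1) == some "*" then
          PySem.Set.add s (PySem.List.slice parts none (some (-1)))
        else s) e
      = ((av.filter isWild).map wildPrefix).foldl PySem.Set.add e := by
  induction av with
  | nil => intro e; rfl
  | cons scope rest ih =>
    intro e
    simp only [List.foldl_cons, List.filter_cons]
    by_cases hw : isWild scope = true
    · rw [hw]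
      have : (if (PySem.List.pyGet? (pySplitColon scope) (-1) == some "*") = true then
          PySem.Set.add e (PySem.List.slice (pySplitColon scope) none (some (-1))) else e)
          = PySem.Set.add e (wildPrefix scope) := by
        rw [if_pos (by simpa [isWild] using hw), wildPrefix, PySem.List.slice_to_neg_one]
      rw [this]
      exact ih _
    · rw [Bool.not_eq_true] at hw
      rw [hw]
      have : (if (PySem.List.pyGet? (pySplitColon scope) (-1) == some "*") = true then
          PySem.Set.add e (PySem.List.slice (pySplitColon scope) none (some (-1))) else e) = e := by
        rw [if_neg (by simpa [isWild] using hw)]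
      rw [this]
      exact ih _

theorem prefixes_eq (av : List String) :
    av.foldl (fun s scope =>
      let parts := pySplitColon scope
      if PySem.List.pyGet? parts (-1) == some "*" then
        PySem.Set.add s (PySem.List.slice parts none (some (-1)))
      else s) PySem.Set.empty
    = PySem.Set.ofList ((av.filter isWild).map wildPrefix) := by
  rw [PySem.Set.ofList]
  exact fold_add_eq av PySem.Set.empty

-- take clamped at the length is the same take
theorem takeMin_eq_take {α : Type} (l : List α) (k : Nat) :
    l.take (min k l.length) = l.take k := by
  rcases Nat.le_total k l.length with h | h
  · rw [Nat.min_eq_left h]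
  · rw [Nat.min_eq_right h, List.take_length, List.take_of_length_le h]

-- B as an existential
theorem alt_eq_true_iff (required : String) (av : List String) :
    scope_matches_py_alt required av = true ↔
      ∃ k ≤ (pySplitColon required).length, ∃ scope ∈ av, isWild scope = true ∧
        (pySplitColon required).take k = wildPrefix scope := by
  unfold scope_matches_py_alt
  rw [prefixes_eq]
  show (PySem.List.pyRange 0 (((pySplitColon required).length : Int) + 1) 1).any
      (fun k => PySem.Set.contains (PySem.Set.ofList ((av.filter isWild).map wildPrefix))
        (PySem.List.slice (pySplitColon required) none (some k))) = true ↔ _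
  have hcast : ((pySplitColon required).length : Int) + 1 = (((pySplitColon required).length + 1 : Nat) : Int) := by
    push_cast; ring
  rw [hcast, PySem.List.pyRange_zero_natCast, List.any_map, List.any_eq_true]
  constructor
  · rintro ⟨k, hk, hc⟩
    rw [List.mem_range] at hk
    rw [Function.comp_apply, PySem.Set.contains_iff, PySem.Set.mem_ofList,
      PySem.List.slice_to_natCast] at hc
    rcases List.mem_map.1 hc with ⟨s, hs, hp⟩
    rcases List.mem_filter.1 hs with ⟨hsav, hw⟩
    -- if k > length, take k = whole list; replace k by min
    refine ⟨min k (pySplitColon required).length, Nat.min_le_right _ _, s, hsav, hw, ?_⟩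
    rw [takeMin_eq_take]
    exact hp.symm
  · rintro ⟨k, hk, s, hsav, hw, hp⟩
    refine ⟨k, List.mem_range.2 (by omega), ?_⟩
    rw [Function.comp_apply, PySem.Set.contains_iff, PySem.Set.mem_ofList,
      PySem.List.slice_to_natCast]
    exact List.mem_map.2 ⟨s, List.mem_filter.2 ⟨hsav, hw⟩, hp.symm⟩

-- take at some bounded k equals q iff take at q.length does
theorem take_exists_iff (rp q : List String) :
    (∃ k ≤ rp.length, rp.take k = q) ↔ rp.take q.length = q := by
  constructor
  · rintro ⟨k, hk, rfl⟩
    rw [List.length_take]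
    congr 1
    omega
  · intro h
    refine ⟨q.length, ?_, h⟩
    have := congrArg List.length h
    rw [List.length_take] at this
    omega

-- bridge: A's per-scope slice test equals "some prefix of required matches"
theorem per_scope_iff (rp : List String) (s : String) (hw : isWild s = true) :
    (PySem.List.slice rp none (some (((pySplitColon s).length : Int) - 1)) = wildPrefix s)
      ↔ ∃ k ≤ rp.length, rp.take k = wildPrefix s := by
  rw [isWild, pyGet_neg_one_some_iff] at hw
  have hne : pySplitColon s ≠ [] := fun h => by simp [h] at hw
  have hlen : 1 ≤ (pySplitColon s).length := List.length_pos_iff.2 hne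
  have hcast : ((pySplitColon s).length : Int) - 1 = (((pySplitColon s).length - 1 : Nat) : Int) := by
    omega
  rw [hcast, PySem.List.slice_to_natCast, take_exists_iff]
  have hq : (wildPrefix s).length = (pySplitColon s).length - 1 := by
    rw [wildPrefix, List.length_dropLast]
  rw [hq]

-- ===== VERDICT (by name: the statement is the Claim_ definition above) =====
theorem scope_matches_py_spec : Claim_equal_scope_matches_py := by
  intro required available _
  unfold Spec_scope_matches_py
  rw [Bool.eq_iff_iff]
  unfold scope_matches_py
  rw [loopA_eq_true_iff, alt_eq_true_iff]
  constructor
  · rintro ⟨s, hs, hw, hp⟩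
    rcases (per_scope_iff _ s hw).1 hp with ⟨k, hk, ht⟩
    exact ⟨k, hk, s, hs, hw, ht⟩
  · rintro ⟨k, hk, s, hs, hw, ht⟩
    exact ⟨s, hs, hw, (per_scope_iff _ s hw).2 ⟨k, hk, ht⟩⟩
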